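-- pv_equiv track=rewrite | github.com/LazarManic/GI-projekat | src/business_logic/util/longest_gap_util.py | get_jump_vector_left
-- ===== SOURCE A (Python) =====
-- def get_jump_vector_left(word:str):
--
--     sol = [1]*(len(word)+1)
--     char_dict = get_char_dict(word)
--
--     for i, c in reversed(list(enumerate(word))):
--         assert c in char_dict
--         arr = char_dict[c]
--
--         if len(arr) > 1:
--             next_i = char_dict[c].pop() - char_dict[c][len(arr) - 1]
--         else:
--             next_i = char_dict[c].pop() + 1
--
--         if sol[i+1] > next_i:
--             sol[i] = sol[i+1]
--         else:
--             sol[i] = next_i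
--
--     sol[0] = sol[1]
--     return sol
--
-- def get_char_dict(word:str):
--     char_dict = {}
--     for i, c in enumerate(word):
--         if c in char_dict:
--             char_dict[c].append(i)
--         else:
--             char_dict[c] = [i]
--
--     return char_dict
-- ===== SOURCE B (Python) =====
-- def get_jump_vector_left(word: str):
--     n = len(word)
--     last_seen = {}
--     nxt = [0] * n
--     for i, c in enumerate(word):
--         nxt[i] = i - last_seen[c] if c in last_seen else i + 1
--         last_seen[c] = i
--     sol = [1] * (n + 1)
--     for i in range(n - 1, -1, -1):
--         sol[i] = max(sol[i + 1], nxt[i])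
--     sol[0] = sol[1]
--     return sol
-- ===== Notes on version B (the rewrite author's own statement) =====
-- stated objective: simpler
-- what changed: Replaces the per-char occurrence-list dict with pop() mutation during the reverse pass by a forward pass keeping only each char's last-seen index to build a next-gap array, then a plain reverse suffix-max pass.
import Mathlib
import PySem

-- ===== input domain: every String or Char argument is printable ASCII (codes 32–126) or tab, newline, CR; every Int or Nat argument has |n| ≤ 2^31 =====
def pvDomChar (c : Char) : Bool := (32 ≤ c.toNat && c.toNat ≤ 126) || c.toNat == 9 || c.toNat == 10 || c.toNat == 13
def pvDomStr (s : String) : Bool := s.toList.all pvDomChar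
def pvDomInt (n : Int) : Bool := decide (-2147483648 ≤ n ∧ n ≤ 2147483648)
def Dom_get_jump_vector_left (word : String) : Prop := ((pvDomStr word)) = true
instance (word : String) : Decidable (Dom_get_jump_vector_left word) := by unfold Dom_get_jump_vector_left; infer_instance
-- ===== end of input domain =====

-- B replaces A's per-char occurrence-list dict (with pop() mutation during the reverse pass)
-- by a forward pass keeping only each char's last seen index, then a plain reverse suffix-max pass
-- (objective: simpler). Return-value equivalence on nonempty words; both raise on "".

-- ===== PORT A =====
-- get_char_dict: pos-list per char (indices as Int, insertion order)
def gjvlBuildStep (d : PySem.Dict Char (List Int)) (p : Int × Char) : PySem.Dict Char (List Int) :=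
  if d.contains p.2 then d.insert p.2 (d.getD p.2 [] ++ [p.1]) else d.insert p.2 [p.1]

def gjvl_get_char_dict (cs : List Char) : PySem.Dict Char (List Int) :=
  (PySem.List.enumerate cs).foldl gjvlBuildStep PySem.Dict.empty

-- one iteration of A's reverse loop; `assert c in char_dict` always holds, and the popped
-- list is never empty on any reached state, so pop() is ported as getLastD/dropLast (exact here)
def gjvlStep (st : PySem.Dict Char (List Int) × List Int) (p : Int × Char) :
    PySem.Dict Char (List Int) × List Int :=
  let d := st.1
  let sol := st.2
  let i := p.1
  let c := p.2
  let arr := d.getD c []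
  let nd : Int × PySem.Dict Char (List Int) :=
    if arr.length > 1 then
      (arr.getLastD 0 - PySem.List.pyGetD arr.dropLast ((arr.dropLast.length : Int) - 1) 0,
        d.insert c arr.dropLast)
    else
      (arr.getLastD 0 + 1, d.insert c arr.dropLast)
  let sol' := if PySem.List.pyGetD sol (i+1) 0 > nd.1 then
      PySem.List.pySetD sol i (PySem.List.pyGetD sol (i+1) 0)
    else
      PySem.List.pySetD sol i nd.1
  (nd.2, sol')

def get_jump_vector_left (word : String) : List Int :=
  let cs := word.toList
  let sol := List.replicate (cs.length + 1) (1 : Int)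
  let char_dict := gjvl_get_char_dict cs
  let st := ((PySem.List.enumerate cs).reverse).foldl gjvlStep (char_dict, sol)
  -- sol[0] = sol[1]: IndexError on the empty word, excluded by Pre_
  PySem.List.pySetD st.2 0 (PySem.List.pyGetD st.2 1 0)

-- ===== PORT B =====
-- forward pass: last_seen dict + next-gap array
def gjvlFwdStep (st : PySem.Dict Char Int × List Int) (p : Int × Char) :
    PySem.Dict Char Int × List Int :=
  let v : Int := match st.1.get? p.2 with
    | some j => p.1 - j
    | none => p.1 + 1
  (st.1.insert p.2 p.1, PySem.List.pySetD st.2 p.1 v)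

def gjvl_alt_next (cs : List Char) : List Int :=
  ((PySem.List.enumerate cs).foldl gjvlFwdStep
    (PySem.Dict.empty, List.replicate cs.length (0 : Int))).2

def get_jump_vector_left_alt (word : String) : List Int :=
  let cs := word.toList
  let n := cs.length
  let nxt := gjvl_alt_next cs
  let sol := (PySem.List.pyRange ((n : Int) - 1) (-1) (-1)).foldl
    (fun sol i =>
      PySem.List.pySetD sol i (max (PySem.List.pyGetD sol (i+1) 0) (PySem.List.pyGetD nxt i 0)))
    (List.replicate (n + 1) (1 : Int))
  -- sol[0] = sol[1]: IndexError on the empty word, excluded by Pre_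
  PySem.List.pySetD sol 0 (PySem.List.pyGetD sol 1 0)

-- ===== PRECONDITION & SPEC =====
-- Pre_ excludes only the empty word, on which both A and B raise IndexError at sol[0] = sol[1].
def Pre_get_jump_vector_left (word : String) : Prop := word ≠ ""
instance (word : String) : Decidable (Pre_get_jump_vector_left word) := by
  unfold Pre_get_jump_vector_left; infer_instance
def pvWitness_get_jump_vector_left : String := "abracadabra"

def Spec_get_jump_vector_left (word : String) (out : List Int) : Prop := out = get_jump_vector_left_alt word
instance (word : String) (out : List Int) : Decidable (Spec_get_jump_vector_left word out) := by unfold Spec_get_jump_vector_left; infer_instance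

-- ===== CLAIM (what is proved, stated in full; the proofs are below) =====
def Claim_equal_get_jump_vector_left : Prop := ∀ (word : String), Dom_get_jump_vector_left word → Pre_get_jump_vector_left word → Spec_get_jump_vector_left word (get_jump_vector_left word)

-- ===== LEMMAS AND PROOFS =====

-- indices (as stored by get_char_dict) of the occurrences of c in an enumerated prefix
def gjvlOccs (l : List (Int × Char)) (c : Char) : List Int :=
  (l.filter (fun p => p.2 == c)).map (·.1)

-- the next-gap value B stores at position m
def gjvlNv (cs : List Char) (m : Nat) : Int :=
  match (gjvlOccs ((PySem.List.enumerate cs).take m) (cs.getD m default)).getLast? with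
  | some t => (m : Int) - t
  | none => (m : Int) + 1


theorem gjvl_enum_getElem? (cs : List Char) (s : Int) (m : Nat) (h : m < cs.length) :
    (PySem.List.enumerate cs s)[m]? = some ((s + m), cs[m]) := by
  induction cs generalizing s m with
  | nil => simp at h
  | cons x xs ih =>
    rw [PySem.List.enumerate_cons]
    cases m with
    | zero => simp
    | succ k =>
      have := ih (s+1) k (by simpa using h)
      simp [this]
      ring

theorem gjvl_enum_take_succ (cs : List Char) (m : Nat) (h : m < cs.length) :
    (PySem.List.enumerate cs).take (m+1)
      = (PySem.List.enumerate cs).take m ++ [((m : Int), cs[m])] := by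
  rw [List.take_add_one, gjvl_enum_getElem? cs 0 m h]
  simp

theorem gjvl_occs_append (l : List (Int × Char)) (i : Int) (c0 c : Char) :
    gjvlOccs (l ++ [(i, c0)]) c = gjvlOccs l c ++ if c0 == c then [i] else [] := by
  simp only [gjvlOccs, List.filter_append, List.map_append]
  by_cases hc : c0 == c <;> simp [hc]

theorem gjvl_build_getD (l : List (Int × Char)) (d : PySem.Dict Char (List Int)) (c : Char) :
    ((l.foldl gjvlBuildStep d).getD c []) = d.getD c [] ++ gjvlOccs l c := by
  induction l generalizing d with
  | nil => simp [gjvlOccs]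
  | cons p l ih =>
    have hstep : gjvlBuildStep d p = d.insert p.2 (d.getD p.2 [] ++ [p.1]) := by
      unfold gjvlBuildStep
      by_cases hc : d.contains p.2
      · simp [hc]
      · have : d.getD p.2 [] = [] := PySem.Dict.getD_of_not_contains d [] (by simpa using hc)
        simp [hc, this]
    rw [List.foldl_cons, hstep, ih]
    have hocc : gjvlOccs (p :: l) c = (if p.2 == c then [p.1] else []) ++ gjvlOccs l c := by
      simp only [gjvlOccs, List.filter_cons]
      by_cases hc : p.2 == c <;> simp [hc]
    rw [hocc, PySem.Dict.getD_insert]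
    by_cases hc : c = p.2
    · subst hc; simp
    · have : (p.2 == c) = false := by simpa using fun h => hc h.symm
      simp [hc, this]

theorem gjvl_fwd_invariant (cs : List Char) (m : Nat) (hm : m ≤ cs.length) :
    (∀ c, ((((PySem.List.enumerate cs).take m).foldl gjvlFwdStep
        (PySem.Dict.empty, List.replicate cs.length (0 : Int))).1).get? c
        = (gjvlOccs ((PySem.List.enumerate cs).take m) c).getLast?)
    ∧ ((((PySem.List.enumerate cs).take m).foldl gjvlFwdStep
        (PySem.Dict.empty, List.replicate cs.length (0 : Int))).2).length = cs.length
    ∧ (∀ j : Nat, j < cs.length →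
        PySem.List.pyGetD ((((PySem.List.enumerate cs).take m).foldl gjvlFwdStep
          (PySem.Dict.empty, List.replicate cs.length (0 : Int))).2) (j : Int) 0
        = if j < m then gjvlNv cs j else 0) := by
  induction m with
  | zero =>
    refine ⟨fun c => by simp [gjvlOccs, PySem.Dict.get?_empty], by simp, fun j hj => by simp⟩
  | succ m ih =>
    have hm' : m < cs.length := by omega
    obtain ⟨ih1, ih2, ih3⟩ := ih (by omega)
    rw [gjvl_enum_take_succ cs m hm', List.foldl_append]
    set st := (((PySem.List.enumerate cs).take m).foldl gjvlFwdStep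
      (PySem.Dict.empty, List.replicate cs.length (0 : Int))) with hst
    have hv : (match st.1.get? cs[m] with
        | some j => (m : Int) - j
        | none => (m : Int) + 1) = gjvlNv cs m := by
      rw [ih1, gjvlNv, List.getD_eq_getElem cs default hm']
    refine ⟨?_, ?_, ?_⟩
    · intro c
      simp only [List.foldl_cons, List.foldl_nil, gjvlFwdStep]
      rw [PySem.Dict.get?_insert, ih1, gjvl_occs_append]
      by_cases hc : c = cs[m]
      · subst hc; simp
      · have : (cs[m] == c) = false := by simpa using fun h => hc h.symm
        simp [hc, this]
    · simp only [List.foldl_cons, List.foldl_nil, gjvlFwdStep]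
      rw [PySem.List.length_pySetD, ih2]
    · intro j hj
      simp only [List.foldl_cons, List.foldl_nil, gjvlFwdStep]
      rw [show ((m : Int)) = ((m : Nat) : Int) from rfl,
        PySem.List.pyGetD_pySetD_natCast _ _ _ _ _ (by rw [ih2]; exact hm')]
      by_cases hjm : j = m
      · subst hjm
        rw [if_pos rfl, if_pos (by omega : j < j + 1), hv]
      · rw [if_neg hjm, ih3 j hj]
        by_cases h1 : j < m
        · rw [if_pos h1, if_pos (by omega : j < m + 1)]
        · rw [if_neg h1, if_neg (by omega : ¬ (j < m + 1))]

theorem gjvl_take_length (cs : List Char) :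
    (PySem.List.enumerate cs).take cs.length = PySem.List.enumerate cs := by
  have := PySem.List.length_enumerate (xs := cs) (s := 0)
  rw [← this]
  exact List.take_length

theorem gjvl_alt_next_spec (cs : List Char) (m : Nat) (h : m < cs.length) :
    PySem.List.pyGetD (gjvl_alt_next cs) (m : Int) 0 = gjvlNv cs m := by
  have hl := gjvl_take_length cs
  have h3 := (gjvl_fwd_invariant cs cs.length le_rfl).2.2 m h
  rw [hl] at h3
  unfold gjvl_alt_next
  rw [h3, if_pos h]

theorem gjvl_loops_eq (cs : List Char) (m : Nat) (d : PySem.Dict Char (List Int))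
    (sol : List Int) (hm : m ≤ cs.length) (hlen : sol.length = cs.length + 1)
    (hd : ∀ c, d.getD c [] = gjvlOccs ((PySem.List.enumerate cs).take m) c) :
    ((((PySem.List.enumerate cs).take m).reverse).foldl gjvlStep (d, sol)).2
      = (PySem.List.pyRange ((m : Int) - 1) (-1) (-1)).foldl
          (fun sol i => PySem.List.pySetD sol i
            (max (PySem.List.pyGetD sol (i+1) 0) (PySem.List.pyGetD (gjvl_alt_next cs) i 0))) sol := by
  induction m generalizing d sol with
  | zero =>
    rw [PySem.List.pyRange_neg_one_eq_nil (by norm_num)]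
    simp
  | succ m ih =>
    have hm' : m < cs.length := by omega
    rw [gjvl_enum_take_succ cs m hm', List.reverse_append, List.reverse_singleton,
      List.singleton_append, List.foldl_cons]
    have harr : d.getD cs[m] [] = gjvlOccs ((PySem.List.enumerate cs).take m) cs[m] ++ [(m : Int)] := by
      rw [hd, gjvl_enum_take_succ cs m hm', gjvl_occs_append]
      simp
    set prev := gjvlOccs ((PySem.List.enumerate cs).take m) cs[m] with hprev
    have hnv : gjvlNv cs m = match prev.getLast? with
        | some t => (m : Int) - t
        | none => (m : Int) + 1 := by
      rw [gjvlNv, List.getD_eq_getElem cs default hm']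
    have hIfMax : ∀ (sl : List Int) (i a v : Int),
        (if a > v then PySem.List.pySetD sl i a else PySem.List.pySetD sl i v)
          = PySem.List.pySetD sl i (max a v) := by
      intro sl i a v
      by_cases h : a > v
      · rw [if_pos h, max_eq_left (le_of_lt h)]
      · rw [if_neg h, max_eq_right (by omega)]
    have hstep : gjvlStep (d, sol) ((m : Int), cs[m])
        = (d.insert cs[m] prev,
           PySem.List.pySetD sol (m : Int)
             (max (PySem.List.pyGetD sol ((m : Int)+1) 0) (gjvlNv cs m))) := by
      simp only [gjvlStep, harr, List.dropLast_concat, List.getLastD_concat]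
      by_cases hp : prev = []
      · have hnv1 : gjvlNv cs m = (m : Int) + 1 := by rw [hnv, hp]; rfl
        rw [if_neg (by simp [hp]), hnv1, hIfMax]
      · have hlp : 1 ≤ prev.length := List.length_pos_of_ne_nil hp
        have hget : PySem.List.pyGetD prev ((prev.length : Int) - 1) 0 = prev.getLast hp := by
          rw [PySem.List.pyGetD_eq_getElem prev 0 (by omega) (by omega)]
          rw [List.getLast_eq_getElem]
          congr 1
          omega
        have hnv2 : gjvlNv cs m = (m : Int) - prev.getLast hp := by
          rw [hnv, List.getLast?_eq_some_getLast hp]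
        rw [if_pos (by simp; omega), hget, hnv2, hIfMax]
    rw [hstep]
    have hinv : ∀ c', (d.insert cs[m] prev).getD c' []
        = gjvlOccs ((PySem.List.enumerate cs).take m) c' := by
      intro c'
      rw [PySem.Dict.getD_insert]
      by_cases hc : c' = cs[m]
      · subst hc; rw [if_pos rfl]
      · rw [if_neg hc, hd c', gjvl_enum_take_succ cs m hm', gjvl_occs_append]
        have : (cs[m] == c') = false := by simpa using fun h => hc h.symm
        simp [this]
    rw [show (((m + 1 : Nat)) : Int) - 1 = (m : Int) from by push_cast; ring,
      PySem.List.pyRange_neg_one_cons (by omega : (-1 : Int) < (m : Nat))]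
    simp only [List.foldl_cons, gjvl_alt_next_spec cs m hm']
    exact ih (d.insert cs[m] prev) _ (by omega)
      (by rw [PySem.List.length_pySetD]; exact hlen) hinv


-- ===== VERDICT (by name: the statement is the Claim_ definition above) =====
theorem get_jump_vector_left_spec : Claim_equal_get_jump_vector_left := by
  intro word _ _
  unfold Spec_get_jump_vector_left get_jump_vector_left get_jump_vector_left_alt
  simp only []
  set cs := word.toList with hcs
  have hd : ∀ c, (gjvl_get_char_dict cs).getD c []
      = gjvlOccs ((PySem.List.enumerate cs).take cs.length) c := by
    intro c
    unfold gjvl_get_char_dict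
    rw [gjvl_build_getD, PySem.Dict.getD_empty, gjvl_take_length]
    simp
  have hmain := gjvl_loops_eq cs cs.length (gjvl_get_char_dict cs)
    (List.replicate (cs.length + 1) (1 : Int)) le_rfl (by simp) hd
  rw [gjvl_take_length] at hmain
  rw [hmain]
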